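-- pv_equiv track=rewrite | github.com/LuisZuettel/bti1013 | programming_tasks/alien.py | shares_common_divisor
-- ===== SOURCE A (Python) =====
-- from typing import Generator
--
-- def shares_common_divisor(a: int, b: int) -> bool:
--     if a == 1 or b == 1:
--         return True
--     try:
--         divisor = next(i for i in get_divisors(a) if i in list(get_divisors(b)))
--         return True
--     except StopIteration:
--         pass
--     return False
--
-- def get_divisors(value: int) -> Generator[int, None, None]:
--     return (i for i in range(2, value + 1) if value % i == 0)
-- ===== SOURCE B (Python) =====
-- from math import gcd
--
-- def shares_common_divisor(a: int, b: int) -> bool: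
--     if a == 1 or b == 1:
--         return True
--     if a < 2 or b < 2:
--         return False
--     return gcd(a, b) > 1
-- ===== Notes on version B (the rewrite author's own statement) =====
-- stated objective: faster
-- what changed: Replaces the divisor enumeration of both numbers (range scan up to a with an inner list-membership scan of b's divisors) by Euclid's gcd with explicit a==1/b==1 and non-positive guards.
import Mathlib
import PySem

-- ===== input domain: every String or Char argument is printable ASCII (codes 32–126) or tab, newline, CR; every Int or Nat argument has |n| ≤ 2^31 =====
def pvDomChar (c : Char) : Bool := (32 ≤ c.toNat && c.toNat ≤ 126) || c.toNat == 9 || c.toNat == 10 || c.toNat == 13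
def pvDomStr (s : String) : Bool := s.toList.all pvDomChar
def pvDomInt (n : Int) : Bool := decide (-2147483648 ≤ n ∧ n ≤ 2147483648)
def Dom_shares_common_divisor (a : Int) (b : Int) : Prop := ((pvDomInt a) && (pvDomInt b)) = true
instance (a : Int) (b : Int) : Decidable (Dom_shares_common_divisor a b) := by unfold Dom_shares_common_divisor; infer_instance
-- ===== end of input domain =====

-- B replaces A's O(a*b) divisor enumeration with Euclid's gcd plus the a==1/b==1 and non-positive guards (objective: faster, asymptotic).


-- ===== PORT A =====
-- get_divisors(value) = (i for i in range(2, value + 1) if value % i == 0)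
def pyGetDivisors (value : Int) : List Int :=
  (PySem.List.pyRange 2 (value + 1) 1).filter (fun i => PySem.Int.mod value i == 0)

def shares_common_divisor (a : Int) (b : Int) : Bool :=
  if a == 1 || b == 1 then true
  else
    -- next(i for i in get_divisors(a) if i in list(get_divisors(b))): True if found, False on StopIteration
    ((pyGetDivisors a).find? (fun i => (pyGetDivisors b).contains i)).isSome

-- ===== PORT B =====
def shares_common_divisor_alt (a : Int) (b : Int) : Bool :=
  if a == 1 || b == 1 then true
  else if a < 2 || b < 2 then false
  else decide (1 < Int.gcd a b)

-- ===== PRECONDITION & SPEC =====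
def Spec_shares_common_divisor (a : Int) (b : Int) (out : Bool) : Prop := out = shares_common_divisor_alt a b
instance (a : Int) (b : Int) (out : Bool) : Decidable (Spec_shares_common_divisor a b out) := by unfold Spec_shares_common_divisor; infer_instance

-- ===== CLAIM (what is proved, stated in full; the proofs are below) =====
def Claim_equal_shares_common_divisor : Prop := ∀ (a : Int) (b : Int), Dom_shares_common_divisor a b → Spec_shares_common_divisor a b (shares_common_divisor a b)

-- ===== LEMMAS AND PROOFS =====

theorem mem_pyGetDivisors {i v : Int} : i ∈ pyGetDivisors v ↔ (2 ≤ i ∧ i ≤ v ∧ i ∣ v) := by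
  simp only [pyGetDivisors, List.mem_filter, PySem.List.mem_pyRange_one, beq_iff_eq,
    PySem.Int.mod_eq_zero_iff_dvd]
  exact ⟨fun ⟨⟨u1, u2⟩, u3⟩ => ⟨u1, by omega, u3⟩, fun ⟨u1, u2, u3⟩ => ⟨⟨u1, by omega⟩, u3⟩⟩

theorem pyGetDivisors_nil {v : Int} (h : v < 2) : pyGetDivisors v = [] := by
  apply List.eq_nil_iff_forall_not_mem.mpr
  intro i hi
  have := mem_pyGetDivisors.mp hi
  omega

theorem found_iff {a b : Int} (ha : 2 ≤ a) (hb : 2 ≤ b) :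
    (((pyGetDivisors a).find? (fun i => (pyGetDivisors b).contains i)).isSome) = decide (1 < Int.gcd a b) := by
  rcases h : ((pyGetDivisors a).find? (fun i => (pyGetDivisors b).contains i)) with _ | ⟨i⟩
  · -- not found: gcd must be 1
    rw [Option.isSome_none, eq_comm, decide_eq_false_iff_not]
    intro hg
    set g : Int := (Int.gcd a b : Int) with hgdef
    have hga : g ∣ a := Int.gcd_dvd_left a b
    have hgb : g ∣ b := Int.gcd_dvd_right a b
    have h2 : 2 ≤ g := by rw [hgdef]; exact_mod_cast hg
    have hla : g ≤ a := Int.le_of_dvd (by omega) hga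
    have hlb : g ≤ b := Int.le_of_dvd (by omega) hgb
    have hmem : g ∈ pyGetDivisors a := mem_pyGetDivisors.mpr ⟨h2, hla, hga⟩
    have := List.find?_eq_none.mp h g hmem
    simp only [List.contains_eq_mem, decide_eq_true_eq] at this
    exact this (mem_pyGetDivisors.mpr ⟨h2, hlb, hgb⟩)
  · -- found i: i divides both, 2 ≤ i, so gcd ≥ i ≥ 2
    have hmem := List.mem_of_find?_eq_some h
    have hpred := List.find?_some h
    simp only [List.contains_eq_mem, decide_eq_true_eq] at hpred
    obtain ⟨h2, _, hia⟩ := mem_pyGetDivisors.mp hmem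
    obtain ⟨_, _, hib⟩ := mem_pyGetDivisors.mp hpred
    have hdg : i.natAbs ∣ Int.gcd a b :=
      Nat.dvd_gcd (Int.natAbs_dvd_natAbs.mpr hia) (Int.natAbs_dvd_natAbs.mpr hib)
    have hgpos : 0 < Int.gcd a b := Int.gcd_pos_of_ne_zero_left b (by omega)
    have hle : i.natAbs ≤ Int.gcd a b := Nat.le_of_dvd hgpos hdg
    simp only [Option.isSome_some, Bool.true_eq, decide_eq_true_eq]
    omega

-- ===== VERDICT (by name: the statement is the Claim_ definition above) =====
theorem shares_common_divisor_spec : Claim_equal_shares_common_divisor := by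
  intro a b _
  unfold Spec_shares_common_divisor shares_common_divisor shares_common_divisor_alt
  by_cases h1 : a == 1 || b == 1
  · simp [h1]
  · simp only [h1]
    by_cases hs : a < 2 || b < 2
    · have : a < 2 ∨ b < 2 := by simpa using hs
      simp only [hs, if_true]
      rcases this with h | h
      · simp [pyGetDivisors_nil h]
      · simp [pyGetDivisors_nil h, List.find?_eq_none]
    · simp only [hs]
      have : ¬ (a < 2) ∧ ¬ (b < 2) := by simpa using hs
      exact found_iff (by omega) (by omega)
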